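-- pv_equiv track=rewrite | github.com/afmwien/afmtool1 | gui/services/data_service_pure.py | get_case_status
-- ===== SOURCE A (Python) =====
-- def get_case_status(case):
--     """Status eines Cases ermitteln anhand der Zeitstempel"""
--     timestamps = case.get("zeitstempel", [])
--     if not timestamps:
--         return "neu"
--
--     if any("archivierung:" in ts for ts in timestamps):
--         return "archivierung"
--     elif any("validierung:" in ts for ts in timestamps):
--         return "validierung"
--     elif any("verarbeitung:" in ts for ts in timestamps):
--         return "verarbeitung"
--     else:
--         return "erfassung"
-- ===== SOURCE B (Python) =====
-- _MARKERS = (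
--     ("archivierung:", "archivierung"),
--     ("validierung:", "validierung"),
--     ("verarbeitung:", "verarbeitung"),
-- )
--
-- def get_case_status(case):
--     """Status eines Cases ermitteln anhand der Zeitstempel"""
--     timestamps = case.get("zeitstempel", [])
--     if not timestamps:
--         return "neu"
--     found = set()
--     for ts in timestamps:
--         for needle, name in _MARKERS:
--             if needle in ts:
--                 found.add(name)
--     for _, name in _MARKERS:
--         if name in found:
--             return name
--     return "erfassung"
-- ===== Notes on version B (the rewrite author's own statement) =====
-- stated objective: alternative
-- what changed: B replaces the three separate any()-scans of the timestamp list by one pass that collects found markers into a set, followed by a table-driven priority decision over the marker table.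
import Mathlib
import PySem

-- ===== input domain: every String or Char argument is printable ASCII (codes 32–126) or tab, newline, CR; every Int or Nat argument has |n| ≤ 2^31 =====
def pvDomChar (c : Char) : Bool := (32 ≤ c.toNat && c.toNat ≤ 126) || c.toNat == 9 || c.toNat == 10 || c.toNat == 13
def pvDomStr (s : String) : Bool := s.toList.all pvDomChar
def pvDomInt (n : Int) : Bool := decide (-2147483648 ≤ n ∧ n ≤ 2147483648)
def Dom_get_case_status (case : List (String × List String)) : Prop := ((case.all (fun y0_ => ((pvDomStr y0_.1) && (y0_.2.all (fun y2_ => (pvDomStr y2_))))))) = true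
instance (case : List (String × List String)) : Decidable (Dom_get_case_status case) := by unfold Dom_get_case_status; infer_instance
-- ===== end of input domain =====

-- B changes the decomposition: one pass collecting found markers into a set, then a table-driven priority decision (alternative; same cost).

-- ===== PORT A =====
-- A: three repeated any()-scans of the timestamp list, in priority order.
def get_case_status (case : List (String × List String)) : String :=
  let timestamps := (List.lookup "zeitstempel" case).getD []
  if timestamps = [] then "neu"
  else if timestamps.any (fun ts => PySem.Str.isIn "archivierung:" ts) then "archivierung"
  else if timestamps.any (fun ts => PySem.Str.isIn "validierung:" ts) then "validierung"
  else if timestamps.any (fun ts => PySem.Str.isIn "verarbeitung:" ts) then "verarbeitung"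
  else "erfassung"

-- ===== PORT B =====
def gcsMarkers : List (String × String) :=
  [("archivierung:", "archivierung"), ("validierung:", "validierung"), ("verarbeitung:", "verarbeitung")]

-- one outer-loop step of B: the inner for-loop over the marker table
def gcsStep (acc : PySem.Set String) (ts : String) : PySem.Set String :=
  gcsMarkers.foldl (fun a p => if PySem.Str.isIn p.1 ts then PySem.Set.add a p.2 else a) acc

def get_case_status_alt (case : List (String × List String)) : String :=
  let timestamps := (List.lookup "zeitstempel" case).getD []
  if timestamps = [] then "neu"
  else
    let found : PySem.Set String := timestamps.foldl gcsStep PySem.Set.empty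
    match gcsMarkers.find? (fun p => PySem.Set.contains found p.2) with
    | some p => p.2
    | none => "erfassung"

-- ===== PRECONDITION & SPEC =====
def Spec_get_case_status (case : List (String × List String)) (out : String) : Prop := out = get_case_status_alt case
instance (case : List (String × List String)) (out : String) : Decidable (Spec_get_case_status case out) := by unfold Spec_get_case_status; infer_instance

-- ===== CLAIM (what is proved, stated in full; the proofs are below) =====
def Claim_equal_get_case_status : Prop := ∀ (case : List (String × List String)), Dom_get_case_status case → Spec_get_case_status case (get_case_status case)

-- ===== LEMMAS AND PROOFS =====

lemma mem_gcsStep (acc : PySem.Set String) (ts : String) (x : String) :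
    x ∈ gcsStep acc ts ↔ x ∈ acc
      ∨ (x = "archivierung" ∧ PySem.Str.isIn "archivierung:" ts = true)
      ∨ (x = "validierung" ∧ PySem.Str.isIn "validierung:" ts = true)
      ∨ (x = "verarbeitung" ∧ PySem.Str.isIn "verarbeitung:" ts = true) := by
  simp only [gcsStep, gcsMarkers, List.foldl]
  split_ifs <;> simp_all [PySem.Set.mem_add] <;> tauto

lemma mem_gcsFold (tss : List String) (acc : PySem.Set String) (x : String) :
    x ∈ tss.foldl gcsStep acc ↔ x ∈ acc
      ∨ ∃ ts ∈ tss,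
          (x = "archivierung" ∧ PySem.Str.isIn "archivierung:" ts = true)
          ∨ (x = "validierung" ∧ PySem.Str.isIn "validierung:" ts = true)
          ∨ (x = "verarbeitung" ∧ PySem.Str.isIn "verarbeitung:" ts = true) := by
  induction tss generalizing acc with
  | nil => simp
  | cons t ts ih =>
    simp only [List.foldl_cons, ih, mem_gcsStep, List.mem_cons]
    constructor
    · rintro ((h | h) | ⟨u, hu, h⟩)
      · exact Or.inl h
      · exact Or.inr ⟨t, Or.inl rfl, h⟩
      · exact Or.inr ⟨u, Or.inr hu, h⟩
    · rintro (h | ⟨u, (rfl | hu), h⟩)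
      · exact Or.inl (Or.inl h)
      · exact Or.inl (Or.inr h)
      · exact Or.inr ⟨u, hu, h⟩

-- ===== VERDICT (by name: the statement is the Claim_ definition above) =====
theorem get_case_status_spec : Claim_equal_get_case_status := by
  intro case _
  unfold Spec_get_case_status get_case_status get_case_status_alt
  set tss := (List.lookup "zeitstempel" case).getD [] with htss
  by_cases hnil : tss = []
  · simp [hnil]
  · simp only [if_neg hnil]
    set S := tss.foldl gcsStep PySem.Set.empty with hS
    have hmem := fun x => mem_gcsFold tss PySem.Set.empty x
    rw [← hS] at hmem
    by_cases h1 : tss.any (fun ts => PySem.Str.isIn "archivierung:" ts)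
    · have hin : ("archivierung" : String) ∈ S := by
        rw [hmem]
        rcases List.any_eq_true.mp h1 with ⟨u, hu, hiu⟩
        exact Or.inr ⟨u, hu, Or.inl ⟨rfl, hiu⟩⟩
      rw [if_pos h1]
      simp [gcsMarkers, hin]
    · have na : ("archivierung" : String) ∉ S := by
        rw [hmem]
        rintro (h | ⟨u, hu, (⟨-, hi⟩ | ⟨he, -⟩ | ⟨he, -⟩)⟩)
        · simp at h
        · exact absurd (List.any_eq_true.mpr ⟨u, hu, hi⟩) h1
        · exact absurd he (by decide)
        · exact absurd he (by decide)
      rw [if_neg h1]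
      by_cases h2 : tss.any (fun ts => PySem.Str.isIn "validierung:" ts)
      · have hin : ("validierung" : String) ∈ S := by
          rw [hmem]
          rcases List.any_eq_true.mp h2 with ⟨u, hu, hiu⟩
          exact Or.inr ⟨u, hu, Or.inr (Or.inl ⟨rfl, hiu⟩)⟩
        rw [if_pos h2]
        simp [gcsMarkers, List.find?, na, hin]
      · have nv : ("validierung" : String) ∉ S := by
          rw [hmem]
          rintro (h | ⟨u, hu, (⟨he, -⟩ | ⟨-, hi⟩ | ⟨he, -⟩)⟩)
          · simp at h
          · exact absurd he (by decide)
          · exact absurd (List.any_eq_true.mpr ⟨u, hu, hi⟩) h2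
          · exact absurd he (by decide)
        rw [if_neg h2]
        by_cases h3 : tss.any (fun ts => PySem.Str.isIn "verarbeitung:" ts)
        · have hin : ("verarbeitung" : String) ∈ S := by
            rw [hmem]
            rcases List.any_eq_true.mp h3 with ⟨u, hu, hiu⟩
            exact Or.inr ⟨u, hu, Or.inr (Or.inr ⟨rfl, hiu⟩)⟩
          rw [if_pos h3]
          simp [gcsMarkers, List.find?, na, nv, hin]
        · have nw : ("verarbeitung" : String) ∉ S := by
            rw [hmem]
            rintro (h | ⟨u, hu, (⟨he, -⟩ | ⟨he, -⟩ | ⟨-, hi⟩)⟩)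
            · simp at h
            · exact absurd he (by decide)
            · exact absurd he (by decide)
            · exact absurd (List.any_eq_true.mpr ⟨u, hu, hi⟩) h3
          rw [if_neg h3]
          simp [gcsMarkers, List.find?, na, nv, nw]
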